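-- pv_equiv track=rewrite | github.com/mmocchi/pytestee | src/pytestee/infrastructure/config/settings.py | _expand_rule_patterns
-- ===== SOURCE A (Python) =====
-- def _expand_rule_patterns(patterns: list[str]) -> set[str]:
--     """Expand rule patterns like 'PTCM' to actual rule IDs like 'PTCM001', 'PTCM002'."""
--     all_rules = {
--         "PTCM001",
--         "PTCM002",
--         "PTCM003",
--         "PTST001",
--         "PTLG001",
--         "PTAS001",
--         "PTAS002",
--         "PTAS003",
--         "PTAS004",
--         "PTAS005",
--         "PTNM001",
--         "PTNM002",
--     }
--
--     expanded_rules = set()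
--     for pattern in patterns:
--         # Exact matches
--         if pattern in all_rules:
--             expanded_rules.add(pattern)
--         else:
--             # Prefix matches
--             for rule_id in all_rules:
--                 if rule_id.startswith(pattern):
--                     expanded_rules.add(rule_id)
--
--     return expanded_rules
-- ===== SOURCE B (Python) =====
-- def _expand_rule_patterns(patterns):
--     all_rules = [
--         "PTCM001", "PTCM002", "PTCM003",
--         "PTST001", "PTLG001",
--         "PTAS001", "PTAS002", "PTAS003", "PTAS004", "PTAS005",
--         "PTNM001", "PTNM002",
--     ]
--     # Build a prefix index once: every prefix of a rule id maps to the rule ids it matches.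
--     index = {}
--     for rid in all_rules:
--         for i in range(len(rid) + 1):
--             index.setdefault(rid[:i], []).append(rid)
--     expanded = set()
--     for pattern in patterns:
--         expanded.update(index.get(pattern, []))
--     return expanded
-- ===== Notes on version B (the rewrite author's own statement) =====
-- stated objective: faster
-- what changed: B precomputes a prefix->rule-ids index over all_rules once (collapsing A's exact-match/prefix branches into one lookup) and then expands each pattern by a single dict lookup, instead of A's per-pattern membership test plus inner startswith scan over all_rules.
import Mathlib
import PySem

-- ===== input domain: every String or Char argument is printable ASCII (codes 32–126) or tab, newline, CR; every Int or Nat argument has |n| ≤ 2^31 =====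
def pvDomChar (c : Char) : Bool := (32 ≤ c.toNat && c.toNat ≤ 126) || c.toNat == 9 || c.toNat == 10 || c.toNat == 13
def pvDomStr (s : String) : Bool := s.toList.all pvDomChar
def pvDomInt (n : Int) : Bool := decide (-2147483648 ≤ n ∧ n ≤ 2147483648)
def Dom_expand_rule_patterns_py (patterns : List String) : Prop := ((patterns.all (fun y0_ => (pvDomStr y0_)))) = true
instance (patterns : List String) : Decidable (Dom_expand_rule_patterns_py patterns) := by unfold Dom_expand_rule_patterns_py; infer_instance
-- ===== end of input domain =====

-- ===== PORT A =====
-- B replaces A's per-pattern scan of all_rules by a prefix index built once, then pure dict lookups (alternative decomposition).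
-- all_rules set literal (distinct elements, insertion order)
def pvAllRulesA : List String :=
  PySem.Set.ofList ["PTCM001", "PTCM002", "PTCM003", "PTST001", "PTLG001", "PTAS001",
    "PTAS002", "PTAS003", "PTAS004", "PTAS005", "PTNM001", "PTNM002"]

def expand_rule_patterns_py (patterns : List String) : List String :=
  patterns.foldl
    (fun expanded_rules pattern =>
      if PySem.Set.contains pvAllRulesA pattern then
        PySem.Set.add expanded_rules pattern
      else
        pvAllRulesA.foldl
          (fun expanded_rules rule_id =>
            if PySem.Str.startswith rule_id pattern then PySem.Set.add expanded_rules rule_id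
            else expanded_rules)
          expanded_rules)
    PySem.Set.empty

-- ===== PORT B =====
def pvAllRulesB : List String :=
  ["PTCM001", "PTCM002", "PTCM003", "PTST001", "PTLG001", "PTAS001",
   "PTAS002", "PTAS003", "PTAS004", "PTAS005", "PTNM001", "PTNM002"]

-- index.setdefault(rid[:i], []).append(rid) is Dict.modify (rid[:i]) [] (· ++ [rid])
def pvPrefixIndex : PySem.Dict String (List String) :=
  pvAllRulesB.foldl
    (fun index rid =>
      (PySem.List.pyRange 0 ((PySem.Str.len rid : Int) + 1) 1).foldl
        (fun index i => index.modify (PySem.Str.slice rid none (some i)) [] (fun l => l ++ [rid]))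
        index)
    PySem.Dict.empty

def expand_rule_patterns_py_alt (patterns : List String) : List String :=
  patterns.foldl
    (fun expanded pattern => PySem.Set.update expanded (pvPrefixIndex.getD pattern []))
    PySem.Set.empty

-- ===== PRECONDITION & SPEC =====
def Spec_expand_rule_patterns_py (patterns : List String) (out : List String) : Prop := out = expand_rule_patterns_py_alt patterns
instance (patterns : List String) (out : List String) : Decidable (Spec_expand_rule_patterns_py patterns out) := by unfold Spec_expand_rule_patterns_py; infer_instance

-- ===== CLAIM (what is proved, stated in full; the proofs are below) =====
def Claim_equal_expand_rule_patterns_py : Prop := ∀ (patterns : List String), Dom_expand_rule_patterns_py patterns → Spec_expand_rule_patterns_py patterns (expand_rule_patterns_py patterns)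

-- ===== LEMMAS AND PROOFS =====

-- every bucket stored in the index is checked against the literal key list
set_option maxRecDepth 100000 in
lemma pvIndex_getD_of_key :
    ∀ p ∈ pvPrefixIndex.keys,
      pvPrefixIndex.getD p [] = pvAllRulesB.filter (fun r => PySem.Str.startswith r p) := by
  decide

-- every prefix of a rule id is a key of the index
set_option maxRecDepth 100000 in
lemma pvPrefix_mem_keys :
    ∀ r ∈ pvAllRulesB, ∀ q ∈ r.toList.inits, String.ofList q ∈ pvPrefixIndex.keys := by
  decide

lemma pvIndex_getD (p : String) :
    pvPrefixIndex.getD p [] = pvAllRulesB.filter (fun r => PySem.Str.startswith r p) := by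
  by_cases hp : p ∈ pvPrefixIndex.keys
  · exact pvIndex_getD_of_key p hp
  · have h1 : pvPrefixIndex.getD p [] = [] := by
      apply PySem.Dict.getD_of_not_contains
      rw [PySem.Dict.contains_eq_decide_mem_keys]
      simpa using hp
    have h2 : pvAllRulesB.filter (fun r => PySem.Str.startswith r p) = [] := by
      rw [List.filter_eq_nil_iff]
      intro r hr hsw
      apply hp
      have hpref : p.toList <+: r.toList := by
        have := hsw
        simp only [PySem.Str.startswith_eq] at this
        exact (PySem.Chars.startswith_iff _ _).mp this
      have hmem : p.toList ∈ r.toList.inits := (List.mem_inits _ _).mpr hpref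
      have := pvPrefix_mem_keys r hr p.toList hmem
      simpa [String.ofList_toList] using this
    rw [h1, h2]

-- exact-match patterns: the only rule id a rule id is a prefix of is itself
lemma pvFilter_of_rule :
    ∀ p ∈ pvAllRulesB, pvAllRulesB.filter (fun r => PySem.Str.startswith r p) = [p] := by
  decide

lemma pvStep_eq (acc : List String) (p : String) :
    (if PySem.Set.contains pvAllRulesA p then
        PySem.Set.add acc p
      else
        pvAllRulesA.foldl
          (fun acc r => if PySem.Str.startswith r p then PySem.Set.add acc r else acc) acc)
      = PySem.Set.update acc (pvPrefixIndex.getD p []) := by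
  rw [pvIndex_getD]
  have hAB : pvAllRulesA = pvAllRulesB := by decide
  by_cases hc : PySem.Set.contains pvAllRulesA p = true
  · have hmem : p ∈ pvAllRulesB := by
      rw [← hAB]; simpa [PySem.Set.contains] using hc
    rw [pvFilter_of_rule p hmem]
    simp only [hc, if_true]
    simp [PySem.Set.update]
  · have hc' : PySem.Set.contains pvAllRulesA p = false := by
      simpa using hc
    rw [hc']
    simp only [Bool.false_eq_true, if_false, PySem.Set.update, hAB]
    rw [List.foldl_filter]

lemma pvFoldl_ext {α β : Type} (f g : α → β → α) (h : ∀ a b, f a b = g a b) :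
    ∀ (l : List β) (init : α), l.foldl f init = l.foldl g init := by
  intro l
  induction l with
  | nil => intro init; rfl
  | cons x xs ih => intro init; simp only [List.foldl_cons, h]; exact ih _

-- ===== VERDICT (by name: the statement is the Claim_ definition above) =====
theorem expand_rule_patterns_py_spec : Claim_equal_expand_rule_patterns_py := by
  intro patterns _
  unfold Spec_expand_rule_patterns_py expand_rule_patterns_py expand_rule_patterns_py_alt
  exact pvFoldl_ext _ _ pvStep_eq patterns PySem.Set.empty
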